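-- pv_equiv track=rewrite | github.com/faizan12123/Vigenere-Cipher-Decryption | code_faizan.py | cycleKey
-- ===== SOURCE A (Python) =====
-- def cycleKey(stringToDecode, keyword):
--     keyword = list(keyword)
--     if len(stringToDecode) == len(keyword):
--         return(keyword)
--     else:
--         for i in range(len(stringToDecode) -
--                        len(keyword)):
--             keyword.append(keyword[i % len(keyword)])
--     return("" . join(keyword))
-- ===== SOURCE B (Python) =====
-- def cycleKey(stringToDecode, keyword):
--     keyword = list(keyword)
--     if len(stringToDecode) == len(keyword):
--         return keyword
--     L = len(keyword)
--     target = max(len(stringToDecode), L)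
--     reps = -(-target // L)  # ceiling division; ZeroDivisionError when L == 0, as in A
--     return "".join((keyword * reps)[:target])
-- ===== Notes on version B (the rewrite author's own statement) =====
-- stated objective: idiomatic
-- what changed: Replaces A's per-character self-referential append loop (indexing into the list being grown) with whole-keyword replication: compute the ceiling number of repetitions, replicate the keyword list once and slice to the target length.
-- outside the precondition, e.g. on cycleKey('ab', 'xy'): A returns ['x', 'y'], B returns ['x', 'y']; on cycleKey('abc', ''): A raises ZeroDivisionError, B raises ZeroDivisionError
import Mathlib
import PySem

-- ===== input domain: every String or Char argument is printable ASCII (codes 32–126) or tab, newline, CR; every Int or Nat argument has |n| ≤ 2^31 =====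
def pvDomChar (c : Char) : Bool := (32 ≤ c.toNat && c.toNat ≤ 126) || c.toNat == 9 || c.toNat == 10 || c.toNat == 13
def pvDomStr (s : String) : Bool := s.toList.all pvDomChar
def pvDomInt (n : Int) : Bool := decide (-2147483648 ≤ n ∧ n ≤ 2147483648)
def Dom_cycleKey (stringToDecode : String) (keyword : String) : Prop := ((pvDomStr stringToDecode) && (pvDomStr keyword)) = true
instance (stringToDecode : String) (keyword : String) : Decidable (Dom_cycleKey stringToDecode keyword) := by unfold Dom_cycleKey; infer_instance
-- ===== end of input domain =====

-- B replaces A's self-referential per-character append loop by whole-keyword replication and a slice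
-- (same cost; objective: idiomatic). Return-value equivalence only (neither version mutates its arguments).

-- ===== PORT A =====
-- A's loop: keyword.append(keyword[i % len(keyword)]) — the list indexed is the list being grown.
def cycleKey (stringToDecode : String) (keyword : String) : String :=
  let kw := keyword.toList
  if stringToDecode.toList.length == kw.length then String.ofList kw  -- Python returns the char LIST here (outside Pre_)
  else
    let n : Int := (stringToDecode.toList.length : Int) - (kw.length : Int)
    let kw := (PySem.List.pyRange 0 n 1).foldl
      (fun acc i => acc ++ [PySem.List.pyGetD acc (PySem.Int.mod i (acc.length : Int)) ' ']) kw
    String.ofList kw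

-- ===== PORT B =====
def cycleKey_alt (stringToDecode : String) (keyword : String) : String :=
  let kw := keyword.toList
  if stringToDecode.toList.length == kw.length then String.ofList kw  -- Python returns the char LIST here (outside Pre_)
  else
    let L : Int := kw.length
    let target : Int := max (stringToDecode.toList.length : Int) L
    let reps : Int := -(PySem.Int.floordiv (-target) L)  -- -(-target // L); // raises on L = 0 (outside Pre_)
    -- keyword * reps : list repetition (reps ≥ 1 under Pre_), then the slice [:target]
    String.ofList (PySem.List.slice (List.flatten (List.replicate reps.toNat kw)) none (some target))

-- ===== PRECONDITION & SPEC =====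
-- Pre_ excludes (a) equal-length inputs, where A returns a LIST of characters, not a value of the
-- declared String type, and (b) the empty keyword, where A raises ZeroDivisionError (i % 0).
def Pre_cycleKey (stringToDecode : String) (keyword : String) : Prop :=
  stringToDecode.toList.length ≠ keyword.toList.length ∧ keyword.toList ≠ []
instance (stringToDecode : String) (keyword : String) : Decidable (Pre_cycleKey stringToDecode keyword) := by unfold Pre_cycleKey; infer_instance
def pvWitness_cycleKey : String × String := ("HELLOWORLD", "key")

def Spec_cycleKey (stringToDecode : String) (keyword : String) (out : String) : Prop := out = cycleKey_alt stringToDecode keyword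
instance (stringToDecode : String) (keyword : String) (out : String) : Decidable (Spec_cycleKey stringToDecode keyword out) := by unfold Spec_cycleKey; infer_instance

-- ===== CLAIM (what is proved, stated in full; the proofs are below) =====
def Claim_equal_cycleKey : Prop := ∀ (stringToDecode : String) (keyword : String), Dom_cycleKey stringToDecode keyword → Pre_cycleKey stringToDecode keyword → Spec_cycleKey stringToDecode keyword (cycleKey stringToDecode keyword)

-- ===== LEMMAS AND PROOFS =====

-- the cyclic extension both programs compute, as a closed form
def cyc (kw : List Char) (t : Nat) : List Char :=
  (List.range t).map (fun j => kw.getD (j % kw.length) ' ')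

lemma cyc_len (kw : List Char) : cyc kw kw.length = kw := by
  apply List.ext_getElem <;> simp [cyc]
  intro i h1 h2
  rw [Nat.mod_eq_of_lt h2]
  simp [List.getElem?_eq_getElem h2]

-- A's self-referential fold over range n produces the cyclic extension to length L + n
lemma foldA_cyc (kw : List Char) (h : kw ≠ []) (n : Nat) :
    (List.range n).foldl (fun acc i => acc ++ [acc.getD (i % acc.length) ' ']) kw
      = cyc kw (kw.length + n) := by
  induction n with
  | zero => simp [cyc_len kw]
  | succ m ih =>
    rw [List.range_succ, List.foldl_append, ih]
    have hlen : (cyc kw (kw.length + m)).length = kw.length + m := by simp [cyc]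
    have hL : 0 < kw.length := List.length_pos_iff.mpr h
    simp only [List.foldl_cons, List.foldl_nil, hlen]
    rw [Nat.mod_eq_of_lt (show m < kw.length + m by omega)]
    have hget : (cyc kw (kw.length + m)).getD m ' ' = kw.getD (m % kw.length) ' ' := by
      simp only [cyc, List.getD_eq_getElem?_getD, List.getElem?_map,
        List.getElem?_range (show m < kw.length + m by omega), Option.map_some]
      rfl
    rw [hget, show kw.length + (m + 1) = (kw.length + m) + 1 from rfl]
    simp only [cyc, List.range_succ, List.map_append, List.map_cons, List.map_nil]
    congr 3
    rw [Nat.add_mod_left]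

-- list repetition (keyword * reps) is the cyclic extension to length r * L
lemma flatten_replicate_cyc (kw : List Char) (r : Nat) :
    List.flatten (List.replicate r kw) = cyc kw (r * kw.length) := by
  induction r with
  | zero => simp [cyc]
  | succ m ih =>
    rw [List.replicate_succ, List.flatten_cons, ih,
      show (m + 1) * kw.length = kw.length + m * kw.length from by ring]
    simp only [cyc, List.range_add, List.map_append, List.map_map]
    congr 1
    · exact (cyc_len kw).symm
    · apply List.map_congr_left
      intro j _
      simp [Nat.add_mod_left]

lemma take_cyc (kw : List Char) (t u : Nat) (h : t ≤ u) :
    (cyc kw u).take t = cyc kw t := by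
  simp [cyc, ← List.map_take, List.take_range, Nat.min_eq_left h]

-- ===== VERDICT (by name: the statement is the Claim_ definition above) =====
theorem cycleKey_spec : Claim_equal_cycleKey := by
  intro s k _ hpre
  obtain ⟨hne, hkne⟩ := hpre
  unfold Spec_cycleKey cycleKey cycleKey_alt
  simp only [beq_iff_eq, if_neg hne]
  set kw := k.toList with hkw
  set t := s.toList.length with ht
  set L := kw.length with hLdef
  have hL : 0 < L := List.length_pos_iff.mpr hkne
  have hLpos : (0 : Int) < (L : Int) := by exact_mod_cast hL
  -- A's fold equals the cyclic extension to length L + (t - L).toNat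
  have hA : (PySem.List.pyRange 0 ((t : Int) - (L : Int)) 1).foldl
      (fun acc i => acc ++ [PySem.List.pyGetD acc (PySem.Int.mod i (acc.length : Int)) ' ']) kw
      = cyc kw (L + ((t : Int) - (L : Int)).toNat) := by
    rw [PySem.List.pyRange_one]
    simp only [sub_zero, zero_add]
    rw [List.foldl_map, ← foldA_cyc kw hkne]
    apply PySem.List.foldl_congr_mem
    intro acc i _
    rw [PySem.Int.mod_natCast i acc.length, PySem.List.pyGetD_natCast]
  rw [hA]
  -- B's replicate-and-slice equals the cyclic extension truncated to target
  have htarget : max ((t : Nat) : Int) ((L : Nat) : Int) = ((max t L : Nat) : Int) := by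
    simp [Nat.cast_max]
  rw [htarget]
  set T := max t L with hT
  have hTL : L ≤ T := le_max_right t L
  set q : Int := -(PySem.Int.floordiv (-((T : Nat) : Int)) ((L : Nat) : Int)) with hq
  have hfd : PySem.Int.floordiv (-((T : Nat) : Int)) ((L : Nat) : Int)
      = (-(T : Int)) / (L : Int) := PySem.Int.floordiv_eq_ediv_of_pos hLpos
  have hTle : (T : Int) ≤ q * (L : Int) := by
    rw [hq, hfd]
    have h1 := Int.mul_ediv_add_emod (-(T : Int)) (L : Int)
    have h2 := Int.emod_nonneg (-(T : Int)) (ne_of_gt hLpos)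
    nlinarith [h1, h2]
  have hq0 : 0 ≤ q := by
    by_contra hc
    have hq1 : q ≤ -1 := by omega
    have := mul_le_mul_of_nonneg_right hq1 (le_of_lt hLpos)
    have hT0 : (0 : Int) < (T : Int) := by exact_mod_cast lt_of_lt_of_le hL hTL
    linarith
  have hTleN : T ≤ q.toNat * L := by
    have hcast : ((q.toNat * L : Nat) : Int) = q * (L : Int) := by
      push_cast [Int.toNat_of_nonneg hq0]; ring
    omega
  rw [flatten_replicate_cyc kw q.toNat, PySem.List.slice_to_natCast,
    take_cyc kw T (q.toNat * L) hTleN]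
  congr 2
  rw [hT, Nat.max_def]
  split_ifs with h <;> omega
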